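-- pv_equiv track=rewrite | github.com/IggyIkenna/unified-trading-system-ui | _reference/deployment-api/deployment_api/utils/local_state_manager.py | recompute_status
-- ===== SOURCE A (Python) =====
-- from typing import cast
--
-- STATUS_PENDING = "pending"
--
-- STATUS_RUNNING = "running"
--
-- STATUS_COMPLETED = "completed"
--
-- STATUS_FAILED = "failed"
--
-- _SHARD_DONE = frozenset(["succeeded", "failed", "cancelled"])
--
-- def recompute_status(shards: list[dict[str, object]]) -> str:
--     """
--     Derive overall deployment status from shard states.
--
--     Mirrors the logic in deployment_service.deployment.state.StateManager.
--     """
--     if not shards: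
--         return STATUS_PENDING
--     statuses = [cast(str, s.get("status") or "pending") for s in shards]
--     all_done = all(s in _SHARD_DONE for s in statuses)
--     any_failed = any(s == "failed" for s in statuses)
--     all_failed = all(s == "failed" for s in statuses)
--     any_running = any(s == "running" for s in statuses)
--     any_pending = any(s == "pending" for s in statuses)
--
--     if all_done:
--         if all_failed:
--             return STATUS_FAILED
--         if any_failed:
--             return STATUS_FAILED
--         return STATUS_COMPLETED
--     if any_running or any_pending:
--         return STATUS_RUNNING
--     return STATUS_PENDING
-- ===== SOURCE B (Python) =====
-- STATUS_PENDING = "pending"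
-- STATUS_RUNNING = "running"
-- STATUS_COMPLETED = "completed"
-- STATUS_FAILED = "failed"
--
--
-- def recompute_status(shards):
--     if not shards:
--         return STATUS_PENDING
--     # one pass: classify each shard once, maintaining three flags
--     all_done = True
--     any_failed = False
--     any_active = False
--     for sh in shards:
--         st = sh.get("status") or "pending"
--         if st == "failed":
--             any_failed = True
--         elif st not in ("succeeded", "cancelled"):
--             all_done = False
--             if st == "running" or st == "pending":
--                 any_active = True
--     if all_done:
--         return STATUS_FAILED if any_failed else STATUS_COMPLETED
--     return STATUS_RUNNING if any_active else STATUS_PENDING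
-- ===== Notes on version B (the rewrite author's own statement) =====
-- stated objective: simpler
-- what changed: Replaces A's staged design (materialize a statuses list, then five separate any/all reductions and a redundant all_failed branch) with a single loop that classifies each shard once into an accumulator of three flags (all_done, any_failed, any_active) and decides from the accumulator.
import Mathlib
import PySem

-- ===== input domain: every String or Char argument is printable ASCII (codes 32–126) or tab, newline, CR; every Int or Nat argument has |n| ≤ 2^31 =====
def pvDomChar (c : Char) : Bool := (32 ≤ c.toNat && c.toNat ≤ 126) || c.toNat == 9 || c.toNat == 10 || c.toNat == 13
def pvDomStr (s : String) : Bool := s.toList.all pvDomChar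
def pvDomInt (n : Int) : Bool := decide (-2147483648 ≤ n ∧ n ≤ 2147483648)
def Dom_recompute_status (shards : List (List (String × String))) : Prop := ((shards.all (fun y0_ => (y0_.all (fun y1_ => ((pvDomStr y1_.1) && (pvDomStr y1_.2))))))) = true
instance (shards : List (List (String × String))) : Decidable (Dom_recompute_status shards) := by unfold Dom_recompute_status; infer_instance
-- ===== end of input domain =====

-- B replaces A's staged passes (build a statuses list, then five any/all reductions and a
-- redundant all_failed branch) with a single loop over the shards carrying three flags (simpler).

-- shared normalizer: `s.get("status") or "pending"` (missing or "" is falsy)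
def pvNormStatus (sh : List (String × String)) : String :=
  match (PySem.Dict.mk sh).get? "status" with
  | none => "pending"
  | some s => if s = "" then "pending" else s

def pvShardDone : PySem.Set String := PySem.Set.ofList ["succeeded", "failed", "cancelled"]

-- ===== PORT A =====
def recompute_status (shards : List (List (String × String))) : String :=
  if shards = [] then "pending"
  else
    let statuses := shards.map pvNormStatus
    let all_done := statuses.all (fun s => PySem.Set.contains pvShardDone s)
    let any_failed := statuses.any (fun s => s == "failed")
    let all_failed := statuses.all (fun s => s == "failed")
    let any_running := statuses.any (fun s => s == "running")
    let any_pending := statuses.any (fun s => s == "pending")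
    if all_done then
      if all_failed then "failed"
      else if any_failed then "failed"
      else "completed"
    else if any_running || any_pending then "running"
    else "pending"

-- ===== PORT B =====
-- loop body: update the flags (all_done, any_failed, any_active) for one shard
def pvStep (acc : Bool × Bool × Bool) (sh : List (String × String)) : Bool × Bool × Bool :=
  let st := pvNormStatus sh
  if st == "failed" then (acc.1, true, acc.2.2)
  else if !(st == "succeeded" || st == "cancelled") then
    (false, acc.2.1, if st == "running" || st == "pending" then true else acc.2.2)
  else acc

def recompute_status_alt (shards : List (List (String × String))) : String :=
  if shards = [] then "pending"
  else
    let flags := shards.foldl pvStep (true, false, false)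
    if flags.1 then
      if flags.2.1 then "failed" else "completed"
    else if flags.2.2 then "running" else "pending"

-- ===== PRECONDITION & SPEC =====
def Spec_recompute_status (shards : List (List (String × String))) (out : String) : Prop := out = recompute_status_alt shards
instance (shards : List (List (String × String))) (out : String) : Decidable (Spec_recompute_status shards out) := by unfold Spec_recompute_status; infer_instance

-- ===== CLAIM (what is proved, stated in full; the proofs are below) =====
def Claim_equal_recompute_status : Prop := ∀ (shards : List (List (String × String))), Dom_recompute_status shards → Spec_recompute_status shards (recompute_status shards)

-- ===== LEMMAS AND PROOFS =====

theorem pv_contains_done (s : String) :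
    PySem.Set.contains pvShardDone s = (s == "succeeded" || s == "failed" || s == "cancelled") := by
  rw [Bool.eq_iff_iff]
  simp only [PySem.Set.contains_iff, pvShardDone, PySem.Set.mem_ofList, List.mem_cons,
    List.not_mem_nil, or_false, Bool.or_eq_true, beq_iff_eq]
  tauto

-- characterization of the fold: each flag equals the corresponding reduction over statuses
theorem pv_fold_char (shards : List (List (String × String))) (acc : Bool × Bool × Bool) :
    List.foldl pvStep acc shards =
      (acc.1 && (shards.map pvNormStatus).all (fun s => PySem.Set.contains pvShardDone s),
       acc.2.1 || (shards.map pvNormStatus).any (fun s => s == "failed"),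
       acc.2.2 || (shards.map pvNormStatus).any (fun s => s == "running" || s == "pending")) := by
  induction shards generalizing acc with
  | nil => simp
  | cons sh rest ih =>
    simp only [List.foldl_cons, List.map_cons, List.all_cons, List.any_cons]
    rw [ih]
    unfold pvStep
    rw [pv_contains_done (pvNormStatus sh)]
    set st := pvNormStatus sh
    by_cases h1 : st = "failed"
    · simp [h1]
    · by_cases h2 : st = "succeeded"
      · simp [h2]
      · by_cases h3 : st = "cancelled"
        · simp [h3]
        · have hb1 : (st == "failed") = false := beq_eq_false_iff_ne.mpr h1
          cases hc : (st == "running" || st == "pending") <;>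
            simp [hb1, h2, h3, hc]

theorem pv_any_or (l : List String) :
    (l.any fun s => s == "running" || s == "pending") =
    ((l.any fun s => s == "running") || (l.any fun s => s == "pending")) := by
  induction l with
  | nil => rfl
  | cons a t ih =>
    simp only [List.any_cons, ih]
    cases a == "running" <;> cases a == "pending" <;> simp

-- ===== VERDICT (by name: the statement is the Claim_ definition above) =====
theorem recompute_status_spec : Claim_equal_recompute_status := by
  intro shards _
  unfold Spec_recompute_status recompute_status recompute_status_alt
  by_cases h : shards = []
  · simp [h]
  · simp only [h, if_false, pv_fold_char, Bool.true_and, Bool.false_or]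
    set l := shards.map pvNormStatus with hl
    have hne : l ≠ [] := by simp [hl, h]
    rw [pv_any_or]
    cases hdone : (l.all fun s => PySem.Set.contains pvShardDone s) with
    | false => simp only [Bool.false_eq_true, if_false]
    | true =>
      simp only [if_true]
      cases hanyf : (l.any fun s => s == "failed") with
      | true =>
        simp only [if_true]
        split <;> rfl
      | false =>
        have hallf : (l.all fun s => s == "failed") = false := by
          cases hk : (l.all fun s => s == "failed") with
          | false => rfl
          | true =>
            exfalso
            obtain ⟨x, hx⟩ := List.exists_mem_of_ne_nil l hne
            have hx2 := List.all_eq_true.mp hk x hx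
            have : (l.any fun s => s == "failed") = true :=
              List.any_eq_true.mpr ⟨x, hx, hx2⟩
            rw [hanyf] at this
            exact Bool.false_ne_true this
        simp only [hallf, Bool.false_eq_true, if_false]
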